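-- pv_equiv track=rewrite | github.com/lukewp/wu-train | src/split_lyrics_by_performer.py | split_lines_to_prompt_completion_pairs
-- ===== SOURCE A (Python) =====
-- from typing import List, Dict, Set, Optional
--
-- def split_lines_to_prompt_completion_pairs(
--     lines: List[str],
--     prompt_sep: str = " ++++",
--     completion_stop: str = " ####",
-- ) -> List[Dict[str, str]]:
--     """Return Hugging Face style prompt/completion pairs.
--
--     Each prompt is a line with ``prompt_sep`` appended and the completion is
--     the subsequent line with ``completion_stop`` appended. Verse breaks
--     (empty lines) reset the pairing logic.
--     """
--     pairs: List[Dict[str, str]] = []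
--     block: List[str] = []
--     for line in lines:
--         if line.strip() == "":
--             if block:
--                 for i in range(len(block) - 1):
--                     prompt = block[i].strip() + prompt_sep
--                     completion = block[i + 1].strip() + completion_stop
--                     pairs.append({"prompt": prompt, "completion": completion})
--                 block = []
--         else:
--             block.append(line)
--     if block:
--         for i in range(len(block) - 1):
--             prompt = block[i].strip() + prompt_sep
--             completion = block[i + 1].strip() + completion_stop
--             pairs.append({"prompt": prompt, "completion": completion})
--     return pairs
-- ===== SOURCE B (Python) =====
-- def split_lines_to_prompt_completion_pairs(
--     lines,
--     prompt_sep=" ++++",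
--     completion_stop=" ####",
-- ):
--     """A pair (a, b) is emitted exactly when a and b are adjacent lines that
--     are both non-blank: consecutive pairs *within* a verse block are the same
--     thing as globally adjacent pairs with no blank member, so no block
--     grouping or flush logic is needed at all."""
--     return [
--         {"prompt": a.strip() + prompt_sep, "completion": b.strip() + completion_stop}
--         for a, b in zip(lines, lines[1:])
--         if a.strip() and b.strip()
--     ]
-- ===== Notes on version B (the rewrite author's own statement) =====
-- stated objective: simpler
-- what changed: B drops A's block accumulator and duplicated flush entirely: it filters the zip of adjacent line pairs, using the fact that consecutive pairs within a verse block are exactly the globally adjacent pairs whose two lines are both non-blank.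
import Mathlib
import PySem

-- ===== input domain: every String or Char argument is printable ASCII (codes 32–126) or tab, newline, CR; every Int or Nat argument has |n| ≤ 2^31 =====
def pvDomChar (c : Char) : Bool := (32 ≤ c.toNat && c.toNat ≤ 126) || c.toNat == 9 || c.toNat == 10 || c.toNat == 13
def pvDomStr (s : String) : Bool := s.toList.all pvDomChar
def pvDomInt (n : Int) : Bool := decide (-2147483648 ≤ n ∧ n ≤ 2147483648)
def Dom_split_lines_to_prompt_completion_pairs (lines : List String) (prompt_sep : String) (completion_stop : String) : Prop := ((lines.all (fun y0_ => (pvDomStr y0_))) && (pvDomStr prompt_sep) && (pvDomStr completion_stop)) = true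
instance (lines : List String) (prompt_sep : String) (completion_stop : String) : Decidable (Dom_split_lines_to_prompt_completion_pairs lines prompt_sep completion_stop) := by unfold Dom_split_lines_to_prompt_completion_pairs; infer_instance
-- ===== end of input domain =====

-- B replaces A's block accumulator and duplicated flush with a single filter over the
-- zip of adjacent line pairs: a pair is emitted iff both adjacent lines are non-blank
-- (objective: simpler; same O(n) cost).

-- ===== PORT A =====
-- A's flush: 'for i in range(len(block) - 1): pairs.append({...})'
-- (pyGet? is always 'some' here since 0 ≤ i, i+1 < len(block); .getD "" only discharges the Option)
def pvEmitA (prompt_sep completion_stop : String) (pairs : List (List (String × String))) (block : List String) : List (List (String × String)) :=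
  (PySem.List.pyRange 0 ((block.length : Int) - 1) 1).foldl
    (fun acc i =>
      acc ++ [[("prompt", PySem.Str.strip ((PySem.List.pyGet? block i).getD "") ++ prompt_sep),
               ("completion", PySem.Str.strip ((PySem.List.pyGet? block (i + 1)).getD "") ++ completion_stop)]])
    pairs

-- A's loop body over one line, on the state (pairs, block)
def pvStepA (prompt_sep completion_stop : String) (st : List (List (String × String)) × List String) (line : String) : List (List (String × String)) × List String :=
  if PySem.Str.strip line = "" then
    if st.2 ≠ [] then (pvEmitA prompt_sep completion_stop st.1 st.2, []) else st
  else (st.1, st.2 ++ [line])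

def split_lines_to_prompt_completion_pairs (lines : List String) (prompt_sep : String) (completion_stop : String) : List (List (String × String)) :=
  let st := lines.foldl (pvStepA prompt_sep completion_stop) ([], [])
  if st.2 ≠ [] then pvEmitA prompt_sep completion_stop st.1 st.2 else st.1

-- ===== PORT B =====
-- Source B's single comprehension: '[{...} for a, b in zip(lines, lines[1:]) if a.strip() and b.strip()]'
def split_lines_to_prompt_completion_pairs_alt (lines : List String) (prompt_sep : String) (completion_stop : String) : List (List (String × String)) :=
  (lines.zip (lines.drop 1)).filterMap (fun p =>
    if PySem.Str.strip p.1 ≠ "" ∧ PySem.Str.strip p.2 ≠ "" then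
      some [("prompt", PySem.Str.strip p.1 ++ prompt_sep),
            ("completion", PySem.Str.strip p.2 ++ completion_stop)]
    else none)

-- ===== PRECONDITION & SPEC =====
def Spec_split_lines_to_prompt_completion_pairs (lines : List String) (prompt_sep : String) (completion_stop : String) (out : List (List (String × String))) : Prop := out = split_lines_to_prompt_completion_pairs_alt lines prompt_sep completion_stop
instance (lines : List String) (prompt_sep : String) (completion_stop : String) (out : List (List (String × String))) : Decidable (Spec_split_lines_to_prompt_completion_pairs lines prompt_sep completion_stop out) := by unfold Spec_split_lines_to_prompt_completion_pairs; infer_instance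

-- ===== CLAIM (what is proved, stated in full; the proofs are below) =====
def Claim_equal_split_lines_to_prompt_completion_pairs : Prop := ∀ (lines : List String) (prompt_sep : String) (completion_stop : String), Dom_split_lines_to_prompt_completion_pairs lines prompt_sep completion_stop → Spec_split_lines_to_prompt_completion_pairs lines prompt_sep completion_stop (split_lines_to_prompt_completion_pairs lines prompt_sep completion_stop)

-- ===== LEMMAS AND PROOFS =====

-- B's result, as a named function of the remaining lines (proof-side abbreviation)
def pvAltP (ps cs : String) (xs : List String) : List (List (String × String)) :=
  split_lines_to_prompt_completion_pairs_alt xs ps cs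

-- all consecutive pairs of a block, unconditionally
def pvPairsAll (ps cs : String) (block : List String) : List (List (String × String)) :=
  (block.zip (block.drop 1)).map (fun p =>
    [("prompt", PySem.Str.strip p.1 ++ ps), ("completion", PySem.Str.strip p.2 ++ cs)])

-- indexing by consecutive positions is zipping with the tail
lemma pvZipConsecutive {α : Type} (g : String → String → α) :
    ∀ (block : List String),
      (List.range (block.length - 1)).map (fun k => g (block.getD k "") (block.getD (k + 1) "")) =
        (block.zip (block.drop 1)).map (fun p => g p.1 p.2) := by
  intro block
  induction block with
  | nil => simp
  | cons a rest ih =>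
    cases rest with
    | nil => simp
    | cons b rest' =>
      have hlen : (a :: b :: rest').length - 1 = ((b :: rest').length - 1) + 1 := by simp
      rw [hlen, List.range_succ_eq_map]
      simp only [List.map_cons, List.map_map, List.zip_cons_cons, List.drop_succ_cons,
        List.drop_zero] at ih ⊢
      refine congrArg₂ List.cons rfl ?_
      rw [← ih]
      apply List.map_congr_left
      intro k _
      simp [Function.comp]

-- A's flush equals all consecutive pairs of the block
lemma pvEmitA_eq (ps cs : String) (pairs : List (List (String × String))) (block : List String) :
    pvEmitA ps cs pairs block = pairs ++ pvPairsAll ps cs block := by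
  unfold pvEmitA pvPairsAll
  rw [PySem.List.pyRange_one]
  have hcast : ((block.length : Int) - 1 - 0).toNat = block.length - 1 := by omega
  rw [hcast, List.foldl_map]
  have hfold := PySem.List.foldl_append_singleton_eq_map
    (fun k : Nat =>
      [("prompt", PySem.Str.strip ((PySem.List.pyGet? block ((0 : Int) + (k : Int))).getD "") ++ ps),
       ("completion", PySem.Str.strip ((PySem.List.pyGet? block ((0 : Int) + (k : Int) + 1)).getD "") ++ cs)])
    (List.range (block.length - 1)) pairs
  rw [hfold]
  rw [← pvZipConsecutive (fun x y =>
    [("prompt", PySem.Str.strip x ++ ps), ("completion", PySem.Str.strip y ++ cs)]) block]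
  refine congrArg (fun t => pairs ++ t) ?_
  apply List.map_congr_left
  intro k hk
  simp only [List.mem_range] at hk
  have h1 : PySem.List.pyGet? block ((0 : Int) + (k : Int)) = block[k]? := by
    rw [zero_add, PySem.List.pyGet?_natCast]
  have h2 : PySem.List.pyGet? block ((0 : Int) + (k : Int) + 1) = block[k + 1]? := by
    have : (0 : Int) + (k : Int) + 1 = ((k + 1 : Nat) : Int) := by push_cast; ring
    rw [this, PySem.List.pyGet?_natCast]
  rw [h1, h2]
  simp [List.getD]

-- all lines in a block are non-blank
def pvAllNB (block : List String) : Prop := ∀ x ∈ block, PySem.Str.strip x ≠ ""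

-- a leading blank line contributes nothing to B's pair list
lemma pvAltP_blank_cons (ps cs : String) (l : String) (ls : List String)
    (hl : PySem.Str.strip l = "") : pvAltP ps cs (l :: ls) = pvAltP ps cs ls := by
  cases ls with
  | nil => rfl
  | cons x xs =>
    unfold pvAltP split_lines_to_prompt_completion_pairs_alt
    simp only [List.drop_succ_cons, List.drop_zero, List.zip_cons_cons, List.filterMap_cons]
    rw [if_neg (by simp [hl])]

-- on an all-non-blank list B keeps every consecutive pair
lemma pvAltP_all (ps cs : String) :
    ∀ (block : List String), pvAllNB block → pvAltP ps cs block = pvPairsAll ps cs block := by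
  intro block
  induction block with
  | nil => intro _; rfl
  | cons b bs ih =>
    intro h
    cases bs with
    | nil => rfl
    | cons b' bs' =>
      unfold pvAltP split_lines_to_prompt_completion_pairs_alt pvPairsAll
      simp only [List.drop_succ_cons, List.drop_zero, List.zip_cons_cons, List.filterMap_cons,
        List.map_cons]
      rw [if_pos ⟨h b (by simp), h b' (by simp)⟩]
      refine congrArg₂ List.cons rfl ?_
      exact ih (fun x hx => h x (by simp [hx]))

-- an all-non-blank block followed by a blank line splits B's pair list cleanly
lemma pvAltP_append_blank (ps cs : String) (l : String) (ls : List String)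
    (hl : PySem.Str.strip l = "") :
    ∀ (block : List String), pvAllNB block →
      pvAltP ps cs (block ++ l :: ls) = pvPairsAll ps cs block ++ pvAltP ps cs ls := by
  intro block
  induction block with
  | nil =>
    intro _
    simp only [List.nil_append]
    rw [pvAltP_blank_cons ps cs l ls hl]
    rfl
  | cons b bs ih =>
    intro h
    cases bs with
    | nil =>
      simp only [List.singleton_append]
      unfold pvAltP split_lines_to_prompt_completion_pairs_alt
      simp only [List.drop_succ_cons, List.drop_zero, List.zip_cons_cons, List.filterMap_cons]
      rw [if_neg (by simp [hl])]
      have := pvAltP_blank_cons ps cs l ls hl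
      unfold pvAltP split_lines_to_prompt_completion_pairs_alt at this
      simpa [pvPairsAll] using this
    | cons b' bs' =>
      have ihres := ih (fun x hx => h x (by simp [hx]))
      simp only [List.cons_append] at ihres ⊢
      unfold pvAltP split_lines_to_prompt_completion_pairs_alt at ihres ⊢
      simp only [List.drop_succ_cons, List.drop_zero, List.zip_cons_cons,
        List.filterMap_cons] at ihres ⊢
      rw [if_pos ⟨h b (by simp), h b' (by simp)⟩]
      rw [ihres]
      simp [pvPairsAll]

-- invariant of A's fold: flushing the final state yields pairs ++ B's pairs of (block ++ rest)
lemma pvLoopInv (ps cs : String) :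
    ∀ (ls : List String) (pairs : List (List (String × String))) (block : List String),
      pvAllNB block →
      (let st := ls.foldl (pvStepA ps cs) (pairs, block)
       if st.2 ≠ [] then pvEmitA ps cs st.1 st.2 else st.1) =
        pairs ++ pvAltP ps cs (block ++ ls) := by
  intro ls
  induction ls with
  | nil =>
    intro pairs block h
    simp only [List.foldl_nil, List.append_nil]
    by_cases hb : block = []
    · subst hb; simp [pvAltP, split_lines_to_prompt_completion_pairs_alt]
    · show (if block ≠ [] then pvEmitA ps cs pairs block else pairs) = _
      rw [if_pos hb, pvEmitA_eq, pvAltP_all ps cs block h]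
  | cons l ls ih =>
    intro pairs block h
    simp only [List.foldl_cons]
    by_cases hl : PySem.Str.strip l = ""
    · by_cases hb : block = []
      · subst hb
        have hstep : pvStepA ps cs (pairs, []) l = (pairs, []) := by
          simp [pvStepA, hl]
        rw [hstep, ih pairs [] (by intro x hx; simp at hx)]
        simp only [List.nil_append]
        rw [pvAltP_blank_cons ps cs l ls hl]
      · have hstep : pvStepA ps cs (pairs, block) l = (pvEmitA ps cs pairs block, []) := by
          simp [pvStepA, hl, hb]
        rw [hstep, ih _ [] (by intro x hx; simp at hx)]
        rw [pvEmitA_eq, pvAltP_append_blank ps cs l ls hl block h]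
        simp
    · have hstep : pvStepA ps cs (pairs, block) l = (pairs, block ++ [l]) := by
        simp [pvStepA, hl]
      rw [hstep, ih pairs (block ++ [l]) ?_]
      · rw [List.append_assoc]
        rfl
      · intro x hx
        rcases List.mem_append.mp hx with h1 | h1
        · exact h x h1
        · simp at h1; subst h1; exact hl

-- ===== VERDICT (by name: the statement is the Claim_ definition above) =====
theorem split_lines_to_prompt_completion_pairs_spec : Claim_equal_split_lines_to_prompt_completion_pairs := by
  intro lines ps cs _
  unfold Spec_split_lines_to_prompt_completion_pairs
  unfold split_lines_to_prompt_completion_pairs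
  have := pvLoopInv ps cs lines [] [] (by intro x hx; simp at hx)
  simpa [pvAltP] using this
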